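-- pv_equiv track=rewrite | github.com/galvza/lupai | pipeline/src/utils/date_utils.py | date_range_chunks
-- ===== SOURCE A (Python) =====
-- def date_range_chunks(
--     start_year: int, end_year: int, max_span: int = 10
-- ) -> list[tuple[int, int]]:
--     """Divide um período em chunks de no máximo max_span anos.
--
--     Necessário porque a API do BCB limita consultas a 10 anos por request.
--     Os chunks se sobrepõem no ano de fronteira pra garantir cobertura completa.
--
--     Args:
--         start_year: Ano inicial (ex: 2005).
--         end_year: Ano final (ex: 2025).
--         max_span: Tamanho máximo de cada chunk em anos (padrão: 10).
--
--     Returns: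
--         Lista de tuplas (ano_inicio, ano_fim).
--
--     Raises:
--         ValueError: Se start_year > end_year ou max_span < 1.
--
--     Examples:
--         >>> date_range_chunks(2005, 2025, 10)
--         [(2005, 2014), (2015, 2024), (2025, 2025)]
--         >>> date_range_chunks(2005, 2012, 10)
--         [(2005, 2012)]
--         >>> date_range_chunks(2005, 2035, 10)
--         [(2005, 2014), (2015, 2024), (2025, 2034), (2035, 2035)]
--     """
--     if start_year > end_year:
--         raise ValueError(
--             f"Ano inicial ({start_year}) não pode ser maior que ano final ({end_year})"
--         )
--     if max_span < 1:
--         raise ValueError(f"Span máximo deve ser >= 1, recebeu {max_span}")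
--
--     chunks: list[tuple[int, int]] = []
--     current = start_year
--
--     while current <= end_year:
--         # max_span=10 → chunk cobre 10 anos inclusive (ex: 2005-2014)
--         # A API do BCB conta dataInicial→dataFinal como janela completa
--         chunk_end = min(current + max_span - 1, end_year)
--         chunks.append((current, chunk_end))
--         current = chunk_end + 1
--
--     return chunks
-- ===== SOURCE B (Python) =====
-- def date_range_chunks(start_year, end_year, max_span=10):
--     if start_year > end_year:
--         raise ValueError(
--             f"Ano inicial ({start_year}) não pode ser maior que ano final ({end_year})"
--         )
--     if max_span < 1:
--         raise ValueError(f"Span máximo deve ser >= 1, recebeu {max_span}")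
--     # Build the output back-to-front: the last chunk's start is known in closed
--     # form, every earlier chunk covers exactly max_span years (no clamping needed).
--     last_start = start_year + ((end_year - start_year) // max_span) * max_span
--     chunks = [(last_start, end_year)]
--     s = last_start - max_span
--     while s >= start_year:
--         chunks.append((s, s + max_span - 1))
--         s -= max_span
--     chunks.reverse()
--     return chunks
-- ===== Notes on version B (the rewrite author's own statement) =====
-- stated objective: alternative
-- what changed: B builds the chunk list back-to-front: it computes the last chunk's start in closed form by floor division, then walks downward by max_span prepending fixed-width chunks (no per-chunk clamping with min) and reverses, instead of A's forward cursor loop that clamps each chunk end.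
import Mathlib
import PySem

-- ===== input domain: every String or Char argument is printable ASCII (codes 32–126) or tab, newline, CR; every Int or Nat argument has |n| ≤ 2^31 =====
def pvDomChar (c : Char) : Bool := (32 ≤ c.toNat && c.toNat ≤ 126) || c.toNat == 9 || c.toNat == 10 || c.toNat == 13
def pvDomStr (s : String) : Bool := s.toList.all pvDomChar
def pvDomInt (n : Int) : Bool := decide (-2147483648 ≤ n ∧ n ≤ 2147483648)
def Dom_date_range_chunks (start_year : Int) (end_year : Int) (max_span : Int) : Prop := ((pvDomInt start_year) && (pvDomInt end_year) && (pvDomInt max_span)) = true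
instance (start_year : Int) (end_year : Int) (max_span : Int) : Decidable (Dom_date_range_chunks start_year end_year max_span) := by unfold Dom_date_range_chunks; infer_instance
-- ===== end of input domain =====

-- B builds the chunk list back-to-front from a closed-form last chunk start (fixed-width earlier chunks, no clamping), instead of A's forward cursor loop; same guards. B mutates only its local list.


-- ===== PORT A =====
-- A's while loop, with fuel covering all iterations (the loop advances by ≥ 1 per step when
-- max_span ≥ 1); chunk_end = min(current + max_span - 1, end_year) is written inline
def dateChunksLoopA (current end_year max_span : Int) (fuel : Nat) : List (Int × Int) :=
  match fuel with
  | 0 => []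
  | fuel + 1 =>
    if current ≤ end_year then
      (current, min (current + max_span - 1) end_year)
        :: dateChunksLoopA (min (current + max_span - 1) end_year + 1) end_year max_span fuel
    else []

def date_range_chunks (start_year : Int) (end_year : Int) (max_span : Int) : List (Int × Int) :=
  if start_year > end_year then []          -- Python raises ValueError here (outside Pre_)
  else if max_span < 1 then []              -- Python raises ValueError here (outside Pre_)
  else dateChunksLoopA start_year end_year max_span (end_year + 1 - start_year).toNat

-- ===== PORT B =====
-- B's downward while loop (s >= start_year, appending; the caller reverses); fuel covers all iterations
def dateChunksLoopB (start_year s max_span : Int) (fuel : Nat) (chunks : List (Int × Int)) : List (Int × Int) :=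
  match fuel with
  | 0 => chunks
  | fuel + 1 =>
    if start_year ≤ s then
      dateChunksLoopB start_year (s - max_span) max_span fuel (chunks ++ [(s, s + max_span - 1)])
    else chunks

-- last_start = start_year + ((end_year - start_year) // max_span) * max_span, written inline
def date_range_chunks_alt (start_year : Int) (end_year : Int) (max_span : Int) : List (Int × Int) :=
  if start_year > end_year then []          -- Python raises ValueError here (outside Pre_)
  else if max_span < 1 then []              -- Python raises ValueError here (outside Pre_)
  else
    (dateChunksLoopB start_year
      (start_year + (PySem.Int.floordiv (end_year - start_year) max_span) * max_span - max_span)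
      max_span
      (PySem.Int.floordiv (end_year - start_year) max_span).toNat
      [(start_year + (PySem.Int.floordiv (end_year - start_year) max_span) * max_span, end_year)]).reverse

-- ===== PRECONDITION & SPEC =====
-- Pre_ excludes exactly the inputs on which A raises ValueError (start_year > end_year or max_span < 1)
def Pre_date_range_chunks (start_year : Int) (end_year : Int) (max_span : Int) : Prop :=
  start_year ≤ end_year ∧ 1 ≤ max_span
instance (start_year : Int) (end_year : Int) (max_span : Int) : Decidable (Pre_date_range_chunks start_year end_year max_span) := by unfold Pre_date_range_chunks; infer_instance
def pvWitness_date_range_chunks : Int × Int × Int := (2005, 2025, 10)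

def Spec_date_range_chunks (start_year : Int) (end_year : Int) (max_span : Int) (out : List (Int × Int)) : Prop := out = date_range_chunks_alt start_year end_year max_span
instance (start_year : Int) (end_year : Int) (max_span : Int) (out : List (Int × Int)) : Decidable (Spec_date_range_chunks start_year end_year max_span out) := by unfold Spec_date_range_chunks; infer_instance

-- ===== CLAIM (what is proved, stated in full; the proofs are below) =====
def Claim_equal_date_range_chunks : Prop := ∀ (start_year : Int) (end_year : Int) (max_span : Int), Dom_date_range_chunks start_year end_year max_span → Pre_date_range_chunks start_year end_year max_span → Spec_date_range_chunks start_year end_year max_span (date_range_chunks start_year end_year max_span)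

-- ===== LEMMAS AND PROOFS =====

-- the common closed form: q full-width chunks, then the final chunk ending at end_year
def chunkOf (start m : Int) (i : Nat) : Int × Int :=
  (start + i * m, start + i * m + m - 1)

lemma loopA_gt (c e m : Int) (h : e < c) (fuel : Nat) : dateChunksLoopA c e m fuel = [] := by
  match fuel with
  | 0 => rfl
  | fuel + 1 => rw [dateChunksLoopA, if_neg (by omega)]

-- A's loop equals the closed form
lemma loopA_closed (e m : Int) (hm : 1 ≤ m) :
    ∀ (q : Nat) (c : Int) (fuel : Nat), c ≤ e → (q : Int) * m ≤ e - c → e - c < ((q : Int) + 1) * m →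
      (e + 1 - c).toNat ≤ fuel →
      dateChunksLoopA c e m fuel
        = (List.range q).map (chunkOf c m) ++ [(c + (q : Int) * m, e)] := by
  intro q
  induction q with
  | zero =>
    intro c fuel hce _ hub hfuel
    have hub' : e - c < m := by push_cast at hub; linarith
    match fuel with
    | 0 => omega
    | fuel + 1 =>
      rw [dateChunksLoopA, if_pos hce, min_eq_right (by omega),
        loopA_gt _ _ _ (by omega)]
      simp
  | succ q ih =>
    intro c fuel hce hlb hub hfuel
    have hq0 : (0:Int) ≤ (q:Int) := by positivity
    have hqm : (0:Int) ≤ (q:Int) * m := mul_nonneg hq0 (by omega)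
    have hlb' : (q:Int) * m + m ≤ e - c := by push_cast at hlb; nlinarith
    have hub' : e - c < (q:Int) * m + m + m := by push_cast at hub; nlinarith
    match fuel with
    | 0 => omega
    | fuel + 1 =>
      rw [dateChunksLoopA, if_pos hce, min_eq_left (by omega)]
      have harg : c + m - 1 + 1 = c + m := by ring
      rw [harg, ih (c + m) fuel (by omega) (by omega) (by linarith) (by omega)]
      rw [List.range_succ_eq_map, List.map_cons, List.map_map, List.cons_append]
      congr 1
      · simp [chunkOf]
      congr 1
      · apply List.map_congr_left
        intro i _
        simp only [Function.comp, chunkOf]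
        push_cast
        simp only [Prod.mk.injEq]
        exact ⟨by ring, by ring⟩
      · push_cast
        congr 1
        simp only [Prod.mk.injEq]
        exact ⟨by ring, trivial⟩

-- B's loop unrolled: starting at start + (j-1)*m with fuel j appends j descending chunks
lemma loopB_closed (start m : Int) (hm : 0 ≤ m) :
    ∀ (j : Nat) (acc : List (Int × Int)),
      dateChunksLoopB start (start + ((j : Int) - 1) * m) m j acc
        = acc ++ ((List.range j).reverse.map (chunkOf start m)) := by
  intro j
  induction j with
  | zero => intro acc; rw [dateChunksLoopB]; simp
  | succ j ih =>
    intro acc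
    have hj0 : (0:Int) ≤ (j:Int) := by positivity
    rw [dateChunksLoopB]
    push_cast
    rw [show ((j:Int) + 1 - 1) = (j:Int) by ring]
    rw [if_pos (by nlinarith)]
    rw [show start + (j:Int) * m - m = start + ((j:Int) - 1) * m by ring, ih]
    rw [List.range_succ, List.reverse_append, List.map_append, List.append_assoc]
    congr 1

-- ===== VERDICT (by name: the statement is the Claim_ definition above) =====
theorem date_range_chunks_spec : Claim_equal_date_range_chunks := by
  intro s e m _ hpre
  obtain ⟨h1, h2⟩ := hpre
  unfold Spec_date_range_chunks date_range_chunks date_range_chunks_alt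
  rw [if_neg (by omega), if_neg (by omega), if_neg (by omega), if_neg (by omega)]
  have hm0 : 0 < m := by omega
  set q : Int := PySem.Int.floordiv (e - s) m with hq
  have hqe : q = (e - s) / m := by rw [hq, PySem.Int.floordiv_eq_ediv_of_pos hm0]
  have hq0 : 0 ≤ q := by rw [hqe]; exact Int.ediv_nonneg (by omega) (by omega)
  have hlb : q * m ≤ e - s := by rw [hqe]; exact Int.ediv_mul_le _ (by omega)
  have hub : e - s < (q + 1) * m := by rw [hqe]; exact Int.lt_ediv_add_one_mul_self _ hm0
  have hcast : ((q.toNat : Int)) = q := Int.toNat_of_nonneg hq0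
  have hA := loopA_closed e m h2 q.toNat s (e + 1 - s).toNat h1
    (by rw [hcast]; exact hlb) (by rw [hcast]; exact hub) (le_refl _)
  have hB := loopB_closed s m (by omega) q.toNat [(s + q * m, e)]
  rw [hA, show s + q * m - m = s + ((q.toNat : Int) - 1) * m by rw [hcast]; ring, hB]
  rw [List.reverse_append]
  simp [List.map_reverse, hcast]
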